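-- pv_equiv track=rewrite | github.com/floatingsidewal/CRUX | crux/dataset/template_level_generator.py | _extract_composition_features
-- ===== SOURCE A (Python) =====
-- from typing import Any, Callable, Dict, List, Optional, Set, Tuple
--
-- def _extract_composition_features(resources: List[Dict]) -> Dict[str, Any]:
--     """Extract resource composition features."""
--     features = {}
--
--     features['num_resources'] = len(resources)
--
--     resource_types = [r.get('type', '') for r in resources]
--     features['num_resource_types'] = len(set(resource_types))
--
--     # Type mappings
--     type_checks = {
--         'storage': 'Microsoft.Storage/storageAccounts',
--         'vm': 'Microsoft.Compute/virtualMachines',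
--         'nsg': 'Microsoft.Network/networkSecurityGroups',
--         'vnet': 'Microsoft.Network/virtualNetworks',
--         'keyvault': 'Microsoft.KeyVault/vaults',
--         'sql': 'Microsoft.Sql/servers',
--         'webapp': 'Microsoft.Web/sites'
--     }
--
--     for short_name, full_type in type_checks.items():
--         matching = [r for r in resources if r.get('type') == full_type]
--         features[f'has_{short_name}'] = 1 if matching else 0
--         features[f'count_{short_name}'] = len(matching)
--
--     return features
-- ===== SOURCE B (Python) =====
-- from typing import Any, Dict, List
--
-- _TYPE_CHECKS = [
--     ('storage', 'Microsoft.Storage/storageAccounts'),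
--     ('vm', 'Microsoft.Compute/virtualMachines'),
--     ('nsg', 'Microsoft.Network/networkSecurityGroups'),
--     ('vnet', 'Microsoft.Network/virtualNetworks'),
--     ('keyvault', 'Microsoft.KeyVault/vaults'),
--     ('sql', 'Microsoft.Sql/servers'),
--     ('webapp', 'Microsoft.Web/sites'),
-- ]
--
-- def _extract_composition_features(resources: List[Dict]) -> Dict[str, Any]:
--     """Extract resource composition features in a single streaming pass."""
--     index = {}
--     for i, (_short, full) in enumerate(_TYPE_CHECKS):
--         index[full] = i
--     seen = set()
--     counts = [0] * len(_TYPE_CHECKS)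
--     for r in resources:
--         t = r.get('type', '')
--         seen.add(t)
--         i = index.get(t)
--         if i is not None:
--             counts[i] += 1
--     features = {'num_resources': len(resources), 'num_resource_types': len(seen)}
--     for (short, _full), c in zip(_TYPE_CHECKS, counts):
--         features[f'has_{short}'] = 1 if c else 0
--         features[f'count_{short}'] = c
--     return features
-- ===== Notes on version B (the rewrite author's own statement) =====
-- stated objective: alternative
-- what changed: A single streaming fold over the resources maintains the seen-type set and a fixed vector of seven per-type counts (via a type->slot index), replacing A's seven separate per-type list-comprehension scans and the separate set() pass; the features are then assembled from the accumulator.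
import Mathlib
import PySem

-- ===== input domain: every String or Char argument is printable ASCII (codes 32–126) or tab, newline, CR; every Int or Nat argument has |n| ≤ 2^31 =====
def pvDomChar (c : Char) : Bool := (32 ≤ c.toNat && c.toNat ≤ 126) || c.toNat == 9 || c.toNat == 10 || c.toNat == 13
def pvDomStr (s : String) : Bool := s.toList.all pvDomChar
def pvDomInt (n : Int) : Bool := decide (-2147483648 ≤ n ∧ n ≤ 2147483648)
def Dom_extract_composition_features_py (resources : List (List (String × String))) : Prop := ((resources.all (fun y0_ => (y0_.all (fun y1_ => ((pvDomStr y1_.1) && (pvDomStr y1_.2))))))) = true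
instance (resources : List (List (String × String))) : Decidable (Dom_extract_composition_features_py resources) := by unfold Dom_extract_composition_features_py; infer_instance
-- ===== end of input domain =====

-- B replaces A's seven per-type scans (and the separate set() pass) by ONE streaming fold that
-- maintains the seen-type set and a 7-slot count vector; the features are assembled afterwards.

-- the type_checks mapping, shared verbatim by both sources
def pvTypeChecks : List (String × String) :=
  [("storage", "Microsoft.Storage/storageAccounts"),
   ("vm", "Microsoft.Compute/virtualMachines"),
   ("nsg", "Microsoft.Network/networkSecurityGroups"),
   ("vnet", "Microsoft.Network/virtualNetworks"),
   ("keyvault", "Microsoft.KeyVault/vaults"),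
   ("sql", "Microsoft.Sql/servers"),
   ("webapp", "Microsoft.Web/sites")]

-- ===== PORT A =====
def extract_composition_features_py (resources : List (List (String × String))) : List (String × Int) :=
  let resource_types := resources.map (fun r => (PySem.Dict.mk r).getD "type" "")
  let features : List (String × Int) :=
    [("num_resources", (resources.length : Int)),
     ("num_resource_types", ((PySem.Set.ofList resource_types).length : Int))]
  pvTypeChecks.foldl (fun feats st =>
    let matching := resources.filter (fun r => (PySem.Dict.mk r).get? "type" == some st.2)
    feats ++ [("has_" ++ st.1, if matching.isEmpty then (0 : Int) else 1),
              ("count_" ++ st.1, (matching.length : Int))]) features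

-- ===== PORT B =====
-- index = {full: i for loop over enumerate(_TYPE_CHECKS)}  (distinct fresh keys appended in order)
def pvIndex : PySem.Dict String Int :=
  (PySem.List.enumerate pvTypeChecks).foldl (fun d p => d.insert p.2.2 p.1) PySem.Dict.empty

-- the loop body: update the seen set and, when the type has a slot, bump its count
def pvBStep (st : PySem.Set String × List Int) (r : List (String × String)) :
    PySem.Set String × List Int :=
  let t := (PySem.Dict.mk r).getD "type" ""
  let seen := PySem.Set.add st.1 t
  match pvIndex.get? t with
  | some i => (seen, st.2.modify i.toNat (· + 1))  -- i is always 0..6, so toNat is exact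
  | none => (seen, st.2)

def extract_composition_features_py_alt (resources : List (List (String × String))) : List (String × Int) :=
  let acc := resources.foldl pvBStep (PySem.Set.empty, List.replicate pvTypeChecks.length 0)
  let features : List (String × Int) :=
    [("num_resources", (resources.length : Int)),
     ("num_resource_types", (PySem.Set.len acc.1 : Int))]
  (pvTypeChecks.zip acc.2).foldl (fun fs p =>
    fs ++ [("has_" ++ p.1.1, if p.2 ≠ 0 then (1 : Int) else 0),
           ("count_" ++ p.1.1, p.2)]) features

-- ===== PRECONDITION & SPEC =====
def Spec_extract_composition_features_py (resources : List (List (String × String))) (out : List (String × Int)) : Prop := out = extract_composition_features_py_alt resources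
instance (resources : List (List (String × String))) (out : List (String × Int)) : Decidable (Spec_extract_composition_features_py resources out) := by unfold Spec_extract_composition_features_py; infer_instance

-- ===== CLAIM (what is proved, stated in full; the proofs are below) =====
def Claim_equal_extract_composition_features_py : Prop := ∀ (resources : List (List (String × String))), Dom_extract_composition_features_py resources → Spec_extract_composition_features_py resources (extract_composition_features_py resources)

-- ===== LEMMAS AND PROOFS =====

-- A's per-type scan, named so the fold invariant can speak about it
def pvCnt (ft : String) (rs : List (List (String × String))) : Int :=
  ((rs.filter (fun r => (PySem.Dict.mk r).get? "type" == some ft)).length : Int)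

-- the index dict, evaluated to its literal items
theorem pvIndex_eq : pvIndex = PySem.Dict.mk
    [("Microsoft.Storage/storageAccounts", 0), ("Microsoft.Compute/virtualMachines", 1),
     ("Microsoft.Network/networkSecurityGroups", 2), ("Microsoft.Network/virtualNetworks", 3),
     ("Microsoft.KeyVault/vaults", 4), ("Microsoft.Sql/servers", 5), ("Microsoft.Web/sites", 6)] := by
  rfl

-- the main invariant: one pass of pvBStep from an arbitrary 7-slot state adds exactly
-- A's per-type filter lengths to the slots, and folds the types into the seen set
theorem pv_fold_b (rs : List (List (String × String))) (s : PySem.Set String)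
    (c0 c1 c2 c3 c4 c5 c6 : Int) :
    rs.foldl pvBStep (s, [c0, c1, c2, c3, c4, c5, c6]) =
      ((rs.map (fun r => (PySem.Dict.mk r).getD "type" "")).foldl PySem.Set.add s,
       [c0 + pvCnt "Microsoft.Storage/storageAccounts" rs,
        c1 + pvCnt "Microsoft.Compute/virtualMachines" rs,
        c2 + pvCnt "Microsoft.Network/networkSecurityGroups" rs,
        c3 + pvCnt "Microsoft.Network/virtualNetworks" rs,
        c4 + pvCnt "Microsoft.KeyVault/vaults" rs,
        c5 + pvCnt "Microsoft.Sql/servers" rs,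
        c6 + pvCnt "Microsoft.Web/sites" rs]) := by
  induction rs generalizing s c0 c1 c2 c3 c4 c5 c6 with
  | nil => simp [pvCnt]
  | cons r rs ih =>
    simp only [List.foldl_cons, List.map_cons]
    have hsome : ∀ (s' : PySem.Set String) (cs : List Int) (i : Int),
        pvIndex.get? ((PySem.Dict.mk r).getD "type" "") = some i →
        pvBStep (s', cs) r =
          (PySem.Set.add s' ((PySem.Dict.mk r).getD "type" ""), cs.modify i.toNat (· + 1)) := by
      intro s' cs i h; simp [pvBStep, h]
    have hnone : pvIndex.get? ((PySem.Dict.mk r).getD "type" "") = none →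
        ∀ (s' : PySem.Set String) (cs : List Int),
        pvBStep (s', cs) r =
          (PySem.Set.add s' ((PySem.Dict.mk r).getD "type" ""), cs) := by
      intro h s' cs; simp [pvBStep, h]
    rcases hg : (PySem.Dict.mk r).get? "type" with _ | v
    · have hd : (PySem.Dict.mk r).getD "type" "" = "" := by
        simp [PySem.Dict.getD_eq_get?_getD, hg]
      rw [hnone (by rw [hd]; rfl), ih]
      simp [pvCnt, hg, hd]
    · have hd : (PySem.Dict.mk r).getD "type" "" = v := by
        simp [PySem.Dict.getD_eq_get?_getD, hg]
      by_cases h1 : v = "Microsoft.Storage/storageAccounts"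
      · rw [hsome _ _ 0 (by rw [hd, h1]; rfl),
          show ([c0, c1, c2, c3, c4, c5, c6].modify (Int.toNat 0) (· + 1)) =
            [c0 + 1, c1, c2, c3, c4, c5, c6] from rfl, ih]
        simp [pvCnt, hg, hd, h1]; omega
      by_cases h2 : v = "Microsoft.Compute/virtualMachines"
      · rw [hsome _ _ 1 (by rw [hd, h2]; rfl),
          show ([c0, c1, c2, c3, c4, c5, c6].modify (Int.toNat 1) (· + 1)) =
            [c0, c1 + 1, c2, c3, c4, c5, c6] from rfl, ih]
        simp [pvCnt, hg, hd, h2]; omega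
      by_cases h3 : v = "Microsoft.Network/networkSecurityGroups"
      · rw [hsome _ _ 2 (by rw [hd, h3]; rfl),
          show ([c0, c1, c2, c3, c4, c5, c6].modify (Int.toNat 2) (· + 1)) =
            [c0, c1, c2 + 1, c3, c4, c5, c6] from rfl, ih]
        simp [pvCnt, hg, hd, h3]; omega
      by_cases h4 : v = "Microsoft.Network/virtualNetworks"
      · rw [hsome _ _ 3 (by rw [hd, h4]; rfl),
          show ([c0, c1, c2, c3, c4, c5, c6].modify (Int.toNat 3) (· + 1)) =
            [c0, c1, c2, c3 + 1, c4, c5, c6] from rfl, ih]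
        simp [pvCnt, hg, hd, h4]; omega
      by_cases h5 : v = "Microsoft.KeyVault/vaults"
      · rw [hsome _ _ 4 (by rw [hd, h5]; rfl),
          show ([c0, c1, c2, c3, c4, c5, c6].modify (Int.toNat 4) (· + 1)) =
            [c0, c1, c2, c3, c4 + 1, c5, c6] from rfl, ih]
        simp [pvCnt, hg, hd, h5]; omega
      by_cases h6 : v = "Microsoft.Sql/servers"
      · rw [hsome _ _ 5 (by rw [hd, h6]; rfl),
          show ([c0, c1, c2, c3, c4, c5, c6].modify (Int.toNat 5) (· + 1)) =
            [c0, c1, c2, c3, c4, c5 + 1, c6] from rfl, ih]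
        simp [pvCnt, hg, hd, h6]; omega
      by_cases h7 : v = "Microsoft.Web/sites"
      · rw [hsome _ _ 6 (by rw [hd, h7]; rfl),
          show ([c0, c1, c2, c3, c4, c5, c6].modify (Int.toNat 6) (· + 1)) =
            [c0, c1, c2, c3, c4, c5, c6 + 1] from rfl, ih]
        simp [pvCnt, hg, hd, h7]; omega
      have hq : pvIndex.get? ((PySem.Dict.mk r).getD "type" "") = none := by
        rw [hd, pvIndex_eq]
        simp only [PySem.Dict.get?_mk_cons, beq_iff_eq]
        rw [if_neg (Ne.symm h1), if_neg (Ne.symm h2), if_neg (Ne.symm h3), if_neg (Ne.symm h4),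
            if_neg (Ne.symm h5), if_neg (Ne.symm h6), if_neg (Ne.symm h7)]
        rfl
      rw [hnone hq, ih]
      simp [pvCnt, hg, hd, h1, h2, h3, h4, h5, h6, h7]

-- 1 if matching else 0, phrased over the length
theorem pv_has_ite {α : Type} (l : List α) :
    (if l.isEmpty then (0 : Int) else 1) = if (l.length : Int) ≠ 0 then 1 else 0 := by
  cases l with
  | nil => simp
  | cons a t => simp; omega

-- ===== VERDICT (by name: the statement is the Claim_ definition above) =====
theorem extract_composition_features_py_spec : Claim_equal_extract_composition_features_py := by
  intro resources _
  unfold Spec_extract_composition_features_py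
  unfold extract_composition_features_py extract_composition_features_py_alt
  rw [show (List.replicate pvTypeChecks.length (0 : Int)) = [0, 0, 0, 0, 0, 0, 0] from rfl]
  rw [pv_fold_b]
  rw [show (PySem.Set.empty : PySem.Set String) = [] from rfl]
  rw [show ∀ xs : List String, xs.foldl PySem.Set.add [] = PySem.Set.ofList xs from
    fun xs => (PySem.Set.ofList_eq_foldl xs).symm]
  simp only [pvTypeChecks, List.zip_cons_cons, List.zip_nil_right, List.foldl_cons,
    List.foldl_nil, List.cons_append, List.nil_append, zero_add, PySem.Set.len]
  simp only [pv_has_ite, pvCnt]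
  rfl
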